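-- pv_equiv track=rewrite | github.com/FuZuoJun/cloud | cloud/client1/p2p.py | majority_chain_group
-- ===== SOURCE A (Python) =====
-- from collections import defaultdict, Counter
--
-- def majority_chain_group(chain_hashes):
--     group = defaultdict(list)
--     for node, chash in chain_hashes.items():
--         group[chash].append(node)
--     for chain, nodes in group.items():
--         if len(nodes) > len(chain_hashes) / 2:
--             return chain, nodes
--     return None, []
-- ===== SOURCE B (Python) =====
-- def majority_chain_group(chain_hashes):
--     # Boyer-Moore majority vote over the hash values, then one verification pass.
--     cand, cnt = None, 0
--     for h in chain_hashes.values():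
--         if cnt == 0:
--             cand, cnt = h, 1
--         elif h == cand:
--             cnt += 1
--         else:
--             cnt -= 1
--     n = len(chain_hashes)
--     if cand is not None and 2 * sum(1 for h in chain_hashes.values() if h == cand) > n:
--         return cand, [node for node, h in chain_hashes.items() if h == cand]
--     return None, []
-- ===== Notes on version B (the rewrite author's own statement) =====
-- stated objective: alternative
-- what changed: Replaced the defaultdict grouping plus dict scan with a Boyer-Moore majority vote over the hash values followed by one verification/gather pass, so no dict of node lists is ever built.
import Mathlib
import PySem

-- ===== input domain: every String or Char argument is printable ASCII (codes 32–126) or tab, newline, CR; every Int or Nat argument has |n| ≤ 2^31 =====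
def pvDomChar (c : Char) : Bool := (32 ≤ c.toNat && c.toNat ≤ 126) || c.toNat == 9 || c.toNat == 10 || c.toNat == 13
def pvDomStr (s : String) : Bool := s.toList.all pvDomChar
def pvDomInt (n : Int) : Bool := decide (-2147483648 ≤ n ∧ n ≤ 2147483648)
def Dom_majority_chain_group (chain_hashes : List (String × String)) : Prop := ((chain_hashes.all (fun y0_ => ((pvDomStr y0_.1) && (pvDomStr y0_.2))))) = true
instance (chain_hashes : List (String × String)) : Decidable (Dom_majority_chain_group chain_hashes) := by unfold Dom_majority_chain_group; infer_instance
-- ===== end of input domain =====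

-- B replaces A's defaultdict grouping + dict scan by a Boyer-Moore majority vote
-- with one verification/gather pass (alternative algorithm, same return value).


-- ===== PORT A =====
-- the 'for chain, nodes in group.items(): if len(nodes) > len(chain_hashes)/2: return ...' loop;
-- 'len(nodes) > n/2' (Python float division) is exactly '2*len(nodes) > n' on these integers
def pvScanA : List (String × List String) → Int → Option String × List String
  | [], _ => (none, [])
  | (chain, nodes) :: rest, n =>
    if 2 * (nodes.length : Int) > n then (some chain, nodes) else pvScanA rest n

def majority_chain_group (chain_hashes : List (String × String)) : Option String × List String :=
  -- group = defaultdict(list); for node, chash in chain_hashes.items(): group[chash].append(node)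
  let group : PySem.Dict String (List String) :=
    chain_hashes.foldl (fun d p => d.modify p.2 [] (· ++ [p.1])) PySem.Dict.empty
  pvScanA group.items (chain_hashes.length : Int)

-- ===== PORT B =====
-- one Boyer-Moore step: if cnt == 0: cand, cnt = h, 1 elif h == cand: cnt += 1 else: cnt -= 1
def pvBmStep (st : Option String × Int) (h : String) : Option String × Int :=
  if st.2 == 0 then (some h, 1)
  else if (some h : Option String) == st.1 then (st.1, st.2 + 1)
  else (st.1, st.2 - 1)

def majority_chain_group_alt (chain_hashes : List (String × String)) : Option String × List String :=
  let st := chain_hashes.foldl (fun st p => pvBmStep st p.2) ((none : Option String), (0 : Int))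
  let n : Int := chain_hashes.length
  match st.1 with
  | none => (none, [])
  | some c =>
    if 2 * (chain_hashes.foldl (fun acc p => if p.2 == c then acc + 1 else acc) (0 : Int)) > n
    then (some c, (chain_hashes.filter (fun p => p.2 == c)).map (·.1))
    else (none, [])

-- ===== PRECONDITION & SPEC =====
def Spec_majority_chain_group (chain_hashes : List (String × String)) (out : Option String × List String) : Prop := out = majority_chain_group_alt chain_hashes
instance (chain_hashes : List (String × String)) (out : Option String × List String) : Decidable (Spec_majority_chain_group chain_hashes out) := by unfold Spec_majority_chain_group; infer_instance

-- ===== CLAIM (what is proved, stated in full; the proofs are below) =====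
def Claim_equal_majority_chain_group : Prop := ∀ (chain_hashes : List (String × String)), Dom_majority_chain_group chain_hashes → Spec_majority_chain_group chain_hashes (majority_chain_group chain_hashes)

-- ===== LEMMAS AND PROOFS =====

-- number of entries carrying hash h, and their nodes in order
def pvCnt (h : String) (l : List (String × String)) : Nat :=
  (l.filter (fun p => p.2 == h)).length

def pvNodes (h : String) (l : List (String × String)) : List String :=
  (l.filter (fun p => p.2 == h)).map (·.1)

theorem pvCnt_append_singleton (h : String) (l : List (String × String)) (p : String × String) :
    pvCnt h (l ++ [p]) = pvCnt h l + (if p.2 = h then 1 else 0) := by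
  simp [pvCnt, List.filter_append]
  split <;> simp_all

theorem pvCnt_disjoint (h1 h2 : String) (hne : h1 ≠ h2) (l : List (String × String)) :
    pvCnt h1 l + pvCnt h2 l ≤ l.length := by
  induction l with
  | nil => simp [pvCnt]
  | cons p t ih =>
    simp only [pvCnt, List.filter_cons, List.length_cons] at *
    by_cases e1 : p.2 = h1
    · have e2 : ¬ p.2 = h2 := fun hh => hne (e1 ▸ hh ▸ rfl)
      simp [e1, hne]; omega
    · by_cases e2 : p.2 = h2 <;> simp [e1, e2, Ne.symm hne] <;> omega

theorem pvCnt_pos_mem (h : String) (l : List (String × String)) (hp : 0 < pvCnt h l) :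
    h ∈ l.map (·.2) := by
  have hne : l.filter (fun p => p.2 == h) ≠ [] := by
    simp only [pvCnt, List.length_pos_iff] at hp; exact hp
  obtain ⟨x, hx⟩ := List.exists_mem_of_ne_nil _ hne
  obtain ⟨hxl, hxh⟩ := List.mem_filter.mp hx
  simp only [beq_iff_eq] at hxh
  exact hxh ▸ List.mem_map_of_mem hxl

-- the counting loop in B equals pvCnt
theorem pvCountFold (c : String) (l : List (String × String)) (a : Int) :
    l.foldl (fun acc p => if p.2 == c then acc + 1 else acc) a = a + (pvCnt c l : Int) := by
  induction l generalizing a with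
  | nil => simp [pvCnt]
  | cons p t ih =>
    simp only [List.foldl_cons]
    by_cases e : p.2 = c
    · rw [if_pos (by simp [e]), ih]
      simp [pvCnt, e]; ring
    · rw [if_neg (by simp [e]), ih]
      simp [pvCnt, e]

-- Boyer-Moore invariant: count nonnegative; the candidate's hash occupies at most
-- (len + cnt)/2 entries and every other hash at most (len - cnt)/2 entries
theorem pvBmInv (l : List (String × String)) :
    0 ≤ (l.foldl (fun st p => pvBmStep st p.2) ((none : Option String), (0 : Int))).2 ∧
    ∀ h : String,
      2 * (pvCnt h l : Int) ≤ (l.length : Int) +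
        (if some h = (l.foldl (fun st p => pvBmStep st p.2) ((none : Option String), (0 : Int))).1
         then (l.foldl (fun st p => pvBmStep st p.2) ((none : Option String), (0 : Int))).2
         else -(l.foldl (fun st p => pvBmStep st p.2) ((none : Option String), (0 : Int))).2) := by
  induction l using List.reverseRecOn with
  | nil => simp [pvCnt]
  | append_singleton t p ih =>
    rw [List.foldl_append] at *
    obtain ⟨hnn, hinv⟩ := ih
    set st := t.foldl (fun st p => pvBmStep st p.2) ((none : Option String), (0 : Int)) with hst
    simp only [List.foldl_cons, List.foldl_nil, List.length_append, List.length_cons,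
      List.length_nil, pvCnt_append_singleton]
    unfold pvBmStep
    by_cases hz : st.2 = 0
    · simp only [hz, beq_self_eq_true, if_true]
      refine ⟨by norm_num, fun h => ?_⟩
      have := hinv h
      rw [hz] at this
      by_cases e : some h = some p.2
      · have e' : p.2 = h := by injection e.symm
        simp only [e, e', reduceIte]
        split at this <;> push_cast at * <;> omega
      · have e' : ¬ p.2 = h := fun hh => e (by rw [hh])
        simp only [e, e', reduceIte]
        split at this <;> push_cast at * <;> omega
    · have hz' : (st.2 == 0) = false := by simp [hz]
      simp only [hz', Bool.false_eq_true, if_false]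
      by_cases hc : some p.2 = st.1
      · have hc' : ((some p.2 : Option String) == st.1) = true := by simp [hc]
        simp only [hc', if_true]
        refine ⟨by omega, fun h => ?_⟩
        have := hinv h
        by_cases e : some h = st.1
        · have e' : p.2 = h := by rw [← hc] at e; injection e.symm
          simp only [e, e', reduceIte] at *
          push_cast at *; omega
        · have e' : ¬ p.2 = h := fun hh => e (hh ▸ hc)
          simp only [e, e', reduceIte] at *
          push_cast at *; omega
      · have hc' : ((some p.2 : Option String) == st.1) = false := by simp [hc]
        simp only [hc', Bool.false_eq_true, if_false]
        refine ⟨by omega, fun h => ?_⟩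
        have := hinv h
        by_cases e : some h = st.1
        · have e' : ¬ p.2 = h := fun hh => hc (hh ▸ e)
          simp only [e, e', reduceIte] at *
          push_cast at *; omega
        · by_cases e2 : p.2 = h <;>
            simp only [e, if_neg, e2, reduceIte] at * <;> push_cast at * <;> omega

-- A's dict of groups: its getD at c is exactly pvNodes c l
theorem pvGroup_getD (l : List (String × String)) (c : String) :
    (l.foldl (fun d p => d.modify p.2 [] (· ++ [p.1])) PySem.Dict.empty).getD c [] =
      pvNodes c l := by
  have hmap : l.foldl (fun d p => d.modify p.2 [] (· ++ [p.1])) PySem.Dict.empty =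
      (l.map Prod.swap).foldl (fun d p => d.modify p.1 [] (· ++ [p.2])) PySem.Dict.empty := by
    rw [List.foldl_map]
    rfl
  rw [hmap, PySem.Dict.getD_foldl_modify_append]
  simp [pvNodes, List.filter_map, List.map_map, Function.comp_def]

-- A's scan returns (none, []) when every entry fails the majority test
theorem pvScanA_all_fail (items : List (String × List String)) (n : Int)
    (hf : ∀ e ∈ items, ¬ (2 * (e.2.length : Int) > n)) :
    pvScanA items n = (none, []) := by
  induction items with
  | nil => rfl
  | cons e rest ih =>
    obtain ⟨c, v⟩ := e
    have := hf (c, v) (List.mem_cons_self)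
    simp only [pvScanA, if_neg this]
    exact ih fun e he => hf e (List.mem_cons_of_mem _ he)

-- A's scan returns the unique succeeding entry when it is present
theorem pvScanA_find (items : List (String × List String)) (n : Int) (h : String)
    (vh : List String) (hmem : (h, vh) ∈ items) (hsucc : 2 * (vh.length : Int) > n)
    (huniq : ∀ e ∈ items, 2 * (e.2.length : Int) > n → e = (h, vh)) :
    pvScanA items n = (some h, vh) := by
  induction items with
  | nil => cases hmem
  | cons e rest ih =>
    obtain ⟨c, v⟩ := e
    by_cases hp : 2 * (v.length : Int) > n
    · have := huniq (c, v) (List.mem_cons_self) hp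
      injection this with h1 h2
      subst h1; subst h2
      simp only [pvScanA]
      rw [if_pos hp]
    · simp only [pvScanA, if_neg hp]
      have hmem' : (h, vh) ∈ rest := by
        rcases List.mem_cons.mp hmem with he | he
        · exact absurd (by injection he with a b; rw [← b]; exact hsucc) hp
        · exact he
      exact ih hmem' fun e he hpe => huniq e (List.mem_cons_of_mem _ he) hpe

-- ===== VERDICT (by name: the statement is the Claim_ definition above) =====
theorem majority_chain_group_spec : Claim_equal_majority_chain_group := by
  intro l _
  simp only [Spec_majority_chain_group, majority_chain_group, majority_chain_group_alt]
  set G := l.foldl (fun d p => d.modify p.2 [] (· ++ [p.1])) PySem.Dict.empty with hG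
  set st := l.foldl (fun st p => pvBmStep st p.2) ((none : Option String), (0 : Int)) with hst
  obtain ⟨hnn, hinv⟩ := pvBmInv l
  rw [← hst] at hnn hinv
  -- keys of G: the distinct hashes; entries of G.items are (k, pvNodes k l)
  have hkeys : G.keys = PySem.Set.update ([] : List String) (l.map (·.2)) := by
    rw [hG, PySem.Dict.keys_foldl_modify_key]
    simp
  have hnd : G.keys.Nodup := by
    rw [hG]
    exact PySem.Dict.nodup_keys_foldl_modify_key l (·.2) [] _ _
      (by simp [PySem.Dict.nodup_keys_empty])
  have hitems : G.items = G.keys.map (fun k => (k, pvNodes k l)) := by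
    rw [PySem.Dict.items_eq_map_keys G hnd []]
    exact List.map_congr_left fun k _ => by rw [pvGroup_getD]
  by_cases hmaj : ∃ h : String, 2 * (pvCnt h l : Int) > (l.length : Int)
  · obtain ⟨h, hh⟩ := hmaj
    -- uniqueness of the majority hash
    have huniq : ∀ k : String, 2 * (pvCnt k l : Int) > (l.length : Int) → k = h := by
      intro k hk
      by_contra hne
      have := pvCnt_disjoint k h hne l
      push_cast at *; omega
    -- B's candidate is h
    have hcand : st.1 = some h := by
      have := hinv h
      by_cases e : some h = st.1
      · exact e.symm
      · rw [if_neg e] at this; omega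
    -- A finds exactly the entry (h, pvNodes h l)
    have hlen : (pvNodes h l).length = pvCnt h l := by simp [pvNodes, pvCnt]
    have hmemH : h ∈ G.keys := by
      rw [hkeys, PySem.Set.update_nil_left]
      exact (PySem.Set.mem_ofList _ _).mpr (pvCnt_pos_mem h l (by omega))
    have hmemI : (h, pvNodes h l) ∈ G.items := by
      rw [hitems]; exact List.mem_map_of_mem hmemH
    have hA : pvScanA G.items (l.length : Int) = (some h, pvNodes h l) := by
      refine pvScanA_find _ _ h _ hmemI (by rw [hlen]; exact hh) ?_
      intro e he hpe
      rw [hitems] at he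
      obtain ⟨k, _, hk⟩ := List.mem_map.mp he
      rw [← hk] at hpe ⊢
      simp only at hpe
      have : (pvNodes k l).length = pvCnt k l := by simp [pvNodes, pvCnt]
      rw [this] at hpe
      rw [huniq k hpe]
    rw [hA, hcand]
    simp only [pvCountFold]
    rw [if_pos (show 2 * ((0:ℤ) + (pvCnt h l : ℤ)) > (l.length : ℤ) by omega)]
    simp [pvNodes]
  · simp only [not_exists, not_lt] at hmaj
    -- A: every entry fails
    have hA : pvScanA G.items (l.length : Int) = (none, []) := by
      refine pvScanA_all_fail _ _ ?_
      intro e he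
      rw [hitems] at he
      obtain ⟨k, _, hk⟩ := List.mem_map.mp he
      rw [← hk]
      simp only [not_lt]
      have : (pvNodes k l).length = pvCnt k l := by simp [pvNodes, pvCnt]
      rw [this]
      exact hmaj k
    rw [hA]
    cases hc : st.1 with
    | none => rfl
    | some c =>
      simp only [pvCountFold]
      rw [if_neg (show ¬ 2 * ((0:ℤ) + (pvCnt c l : ℤ)) > (l.length : ℤ) by have := hmaj c; omega)]
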